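-- pv_equiv track=rewrite | github.com/Philat/pythonBasics | lesson1/task3.py | formater
-- ===== SOURCE A (Python) =====
-- def formater(m):
--     array_of_time = []
--     array_of_time.append(m)
--     sum_array_of_time = array_of_time[0]
--     for i in range(1,3):
--         array_of_time.append(m*(10**i)+array_of_time[i-1])
--         sum_array_of_time = sum_array_of_time + array_of_time[i]
--     array_of_time.append(sum_array_of_time)
--     return array_of_time
-- ===== SOURCE B (Python) =====
-- def formater(m):
--     # closed form: loop always produces m, 11m, 111m and their sum
--     return [m, 11 * m, 111 * m, m + 11 * m + 111 * m]
-- ===== Notes on version B (the rewrite author's own statement) =====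
-- stated objective: simpler
-- what changed: Replaces the loop with an accumulator array and running sum by the closed-form list literal [m, 11*m, 111*m, m+11*m+111*m].
import Mathlib
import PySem

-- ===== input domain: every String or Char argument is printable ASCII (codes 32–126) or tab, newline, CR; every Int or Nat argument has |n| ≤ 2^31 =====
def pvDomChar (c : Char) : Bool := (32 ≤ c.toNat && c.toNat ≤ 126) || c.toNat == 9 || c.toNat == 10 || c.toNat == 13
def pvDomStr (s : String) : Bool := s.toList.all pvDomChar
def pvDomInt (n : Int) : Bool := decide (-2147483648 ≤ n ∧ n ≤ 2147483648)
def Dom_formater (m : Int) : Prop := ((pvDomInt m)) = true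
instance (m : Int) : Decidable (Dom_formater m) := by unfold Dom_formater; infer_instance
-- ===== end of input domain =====

-- B replaces A's accumulator loop by the closed-form list literal (objective: simpler).

-- ===== PORT A =====
-- literal transliteration: list `array_of_time`, running `sum_array_of_time`,
-- loop over range(1,3); indexing via pyGet? (always in range, getD 0 never used)
def formater (m : Int) : List Int :=
  let arr : List Int := []
  let arr := arr ++ [m]
  let s := (PySem.List.pyGet? arr 0).getD 0
  let st := (PySem.List.pyRange 1 3 1).foldl
    (fun (st : List Int × Int) i =>
      let arr := st.1 ++ [m * (10 ^ i.toNat) + (PySem.List.pyGet? st.1 (i - 1)).getD 0]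
      let s := st.2 + (PySem.List.pyGet? arr i).getD 0
      (arr, s)) (arr, s)
  st.1 ++ [st.2]

-- ===== PORT B =====
def formater_alt (m : Int) : List Int := [m, 11 * m, 111 * m, m + 11 * m + 111 * m]

-- ===== PRECONDITION & SPEC =====
def Spec_formater (m : Int) (out : List Int) : Prop := out = formater_alt m
instance (m : Int) (out : List Int) : Decidable (Spec_formater m out) := by unfold Spec_formater; infer_instance

-- ===== CLAIM (what is proved, stated in full; the proofs are below) =====
def Claim_equal_formater : Prop := ∀ (m : Int), Dom_formater m → Spec_formater m (formater m)

-- ===== LEMMAS AND PROOFS =====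

-- ===== VERDICT (by name: the statement is the Claim_ definition above) =====
theorem formater_spec : Claim_equal_formater := by
  intro m _
  show formater m = formater_alt m
  simp [formater, formater_alt, PySem.List.pyRange, PySem.List.pyGet?, PySem.List.pyIdx?,
    List.range_succ]
  refine ⟨by ring, by ring, by ring⟩
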